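-- pv_equiv track=rewrite | github.com/ahluntang/lscale | topology_generator/elements.py | calculate_prefix
-- ===== SOURCE A (Python) =====
-- def calculate_prefix(hosts) :
--     """ Calculates prefix based on how many hosts/ip addresses are needed.
--
--     :param hosts: amount of hosts that are needed in the network
--     :return: prefix/networkbits as decimal value
--     """
--     bits = 32
--     host_bits = 0
--     h = 1
--     while h < hosts :
--         h = h << 1 # multiply with 2
--         host_bits += 1
--     networkbits = bits - host_bits
--     return networkbits
-- ===== SOURCE B (Python) =====
-- def calculate_prefix(hosts):
--     """ Calculates prefix based on how many hosts/ip addresses are needed.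
--
--     :param hosts: amount of hosts that are needed in the network
--     :return: prefix/networkbits as decimal value
--     """
--     host_bits = (hosts - 1).bit_length() if hosts > 1 else 0
--     return 32 - host_bits
-- ===== Notes on version B (the rewrite author's own statement) =====
-- stated objective: idiomatic
-- what changed: Replaces the doubling loop that counts shifts with a closed-form host-bit count via int.bit_length(), guarded so hosts <= 1 gives 0 host bits like the loop.
import Mathlib
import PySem

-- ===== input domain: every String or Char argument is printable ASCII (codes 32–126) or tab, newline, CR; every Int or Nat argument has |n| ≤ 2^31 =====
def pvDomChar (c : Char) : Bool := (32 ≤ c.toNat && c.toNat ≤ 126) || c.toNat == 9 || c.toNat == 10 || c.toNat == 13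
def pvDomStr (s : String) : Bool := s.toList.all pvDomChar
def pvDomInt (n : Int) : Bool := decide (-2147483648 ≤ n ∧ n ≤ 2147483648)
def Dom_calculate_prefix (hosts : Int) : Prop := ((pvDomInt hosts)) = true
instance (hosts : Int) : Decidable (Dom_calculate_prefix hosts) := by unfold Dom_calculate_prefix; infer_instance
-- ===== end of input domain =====

-- B replaces A's doubling loop that counts shifts with the closed-form bit length of (hosts-1); same return value, stated for |hosts| ≤ 2^31.


-- ===== PORT A =====
-- the while loop: state (h, host_bits); 'h << 1' on a Python int is exactly h * 2.
-- The outer '1 ≤ h' test is only a totality guard for Lean's termination checker: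
-- the loop is entered with h = 1 and h only doubles, so the guard always holds.
def calcLoopA (hosts h host_bits : Int) : Int :=
  if _hpos : 1 ≤ h then
    if h < hosts then calcLoopA hosts (h * 2) (host_bits + 1) else host_bits
  else host_bits
termination_by (hosts - h).toNat
decreasing_by omega

def calculate_prefix (hosts : Int) : Int :=
  let bits : Int := 32
  let host_bits := calcLoopA hosts 1 0
  bits - host_bits

-- ===== PORT B =====
-- (hosts - 1).bit_length() for hosts > 1 (so hosts - 1 > 0) is Nat.size of (hosts-1).toNat
def calculate_prefix_alt (hosts : Int) : Int :=
  let host_bits : Int := if 1 < hosts then Int.ofNat (Nat.size (hosts - 1).toNat) else 0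
  32 - host_bits

-- ===== PRECONDITION & SPEC =====
def Spec_calculate_prefix (hosts : Int) (out : Int) : Prop := out = calculate_prefix_alt hosts
instance (hosts : Int) (out : Int) : Decidable (Spec_calculate_prefix hosts out) := by unfold Spec_calculate_prefix; infer_instance

-- ===== CLAIM (what is proved, stated in full; the proofs are below) =====
def Claim_equal_calculate_prefix : Prop := ∀ (hosts : Int), Dom_calculate_prefix hosts → Spec_calculate_prefix hosts (calculate_prefix hosts)

-- ===== LEMMAS AND PROOFS =====

-- bit length drops by one when halving a positive number
theorem size_succ_div_two (m : Nat) (hm : 1 ≤ m) : Nat.size m = Nat.size (m / 2) + 1 := by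
  apply le_antisymm
  · rw [Nat.size_le]
    have h1 : m / 2 < 2 ^ Nat.size (m / 2) := Nat.lt_size_self _
    have : m < 2 * 2 ^ Nat.size (m / 2) := by omega
    calc m < 2 * 2 ^ Nat.size (m / 2) := this
      _ = 2 ^ (Nat.size (m / 2) + 1) := by ring
  · by_cases hk : Nat.size (m / 2) = 0
    · rw [hk]
      have : 0 < Nat.size m := by rw [Nat.lt_size]; simpa using hm
      omega
    · have hk1 : Nat.size (m / 2) - 1 < Nat.size (m / 2) := by omega
      have h2 : 2 ^ (Nat.size (m / 2) - 1) ≤ m / 2 := Nat.lt_size.mp hk1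
      have : 2 ^ Nat.size (m / 2) ≤ m := by
        have : 2 ^ Nat.size (m / 2) = 2 * 2 ^ (Nat.size (m / 2) - 1) := by
          rw [← pow_succ']
          congr 1
          omega
        omega
      rw [← Nat.lt_size] at this
      omega

-- the loop computes: accumulator plus the bit length of ⌊(hosts-1)/h⌋
theorem calcLoopA_eq (n : Nat) : ∀ (hosts h acc : Int), (hosts - h).toNat ≤ n → 1 ≤ h →
    calcLoopA hosts h acc = acc + Int.ofNat (Nat.size ((hosts - 1) / h).toNat) := by
  induction n with
  | zero =>
    intro hosts h acc hn hh
    rw [calcLoopA]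
    have hlt : ¬ h < hosts := by omega
    simp only [dif_pos hh, if_neg hlt]
    have : ((hosts - 1) / h).toNat = 0 := by
      by_cases h1 : hosts ≤ 1
      · have : (hosts - 1) / h ≤ 0 := Int.ediv_nonpos_of_nonpos_of_neg (by omega) (by omega)
        omega
      · have : (hosts - 1) / h = 0 := Int.ediv_eq_zero_of_lt (by omega) (by omega)
        omega
    simp [this]
  | succ n ih =>
    intro hosts h acc hn hh
    rw [calcLoopA]
    simp only [dif_pos hh]
    by_cases hlt : h < hosts
    · rw [if_pos hlt]
      rw [ih hosts (h * 2) (acc + 1) (by omega) (by omega)]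
      have hq : (hosts - 1) / (h * 2) = ((hosts - 1) / h) / 2 := by
        rw [Int.ediv_ediv_of_nonneg (by omega : (0:Int) ≤ h)]
      have hq0 : 0 ≤ (hosts - 1) / h := Int.ediv_nonneg (by omega) (by omega)
      have hq1 : 1 ≤ (hosts - 1) / h := by
        rw [Int.le_ediv_iff_mul_le (by omega : (0:Int) < h)]
        omega
      have hm : 1 ≤ ((hosts - 1) / h).toNat := by omega
      have htn : (((hosts - 1) / h) / 2).toNat = ((hosts - 1) / h).toNat / 2 := by omega
      rw [hq, htn, size_succ_div_two _ hm]
      simp only [Int.ofNat_eq_natCast]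
      push_cast
      ring
    · rw [if_neg hlt]
      have : ((hosts - 1) / h).toNat = 0 := by
        by_cases h1 : hosts ≤ 1
        · have : (hosts - 1) / h ≤ 0 := Int.ediv_nonpos_of_nonpos_of_neg (by omega) (by omega)
          omega
        · have : (hosts - 1) / h = 0 := Int.ediv_eq_zero_of_lt (by omega) (by omega)
          omega
      simp [this]

-- ===== VERDICT (by name: the statement is the Claim_ definition above) =====
theorem calculate_prefix_spec : Claim_equal_calculate_prefix := by
  intro hosts _
  unfold Spec_calculate_prefix
  simp only [calculate_prefix, calculate_prefix_alt]
  rw [calcLoopA_eq (hosts - 1).toNat hosts 1 0 (by omega) (by omega)]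
  by_cases h1 : 1 < hosts
  · rw [if_pos h1, Int.ediv_one]
    omega
  · rw [if_neg h1]
    have h0 : ((hosts - 1) / 1).toNat = 0 := by rw [Int.ediv_one]; omega
    rw [h0, Nat.size_zero]
    norm_num
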